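-- pv_equiv track=rewrite | github.com/EasyStock/Bull | src/writeToExcel/fupanDetail.py | _format1
-- ===== SOURCE A (Python) =====
-- def _format1(text):
--     texts = text.split(';')
--     ret = ""
--     for i in range(0, len(texts)):
--         if i == 0:
--             ret = texts[i] + ";"
--         else:
--             ret = ret + texts[i]+ ";"
--             if (i+1) % 3==0:
--                 ret = ret + "\n"
--     return ret
-- ===== SOURCE B (Python) =====
-- def _format1(text):
--     texts = text.split(';')
--     pieces = []
--     for i in range(0, len(texts), 3):
--         chunk = texts[i:i+3]
--         piece = ''.join(t + ';' for t in chunk)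
--         if len(chunk) == 3:
--             piece = piece + '\n'
--         pieces.append(piece)
--     return ''.join(pieces)
-- ===== Notes on version B (the rewrite author's own statement) =====
-- stated objective: alternative
-- what changed: Replaces the element-by-element loop with a running (i+1)%3 modulo test by a chunked decomposition: iterate indices in steps of 3, format each 3-slice as one piece (newline appended only to full triples) and join the pieces.
import Mathlib
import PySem

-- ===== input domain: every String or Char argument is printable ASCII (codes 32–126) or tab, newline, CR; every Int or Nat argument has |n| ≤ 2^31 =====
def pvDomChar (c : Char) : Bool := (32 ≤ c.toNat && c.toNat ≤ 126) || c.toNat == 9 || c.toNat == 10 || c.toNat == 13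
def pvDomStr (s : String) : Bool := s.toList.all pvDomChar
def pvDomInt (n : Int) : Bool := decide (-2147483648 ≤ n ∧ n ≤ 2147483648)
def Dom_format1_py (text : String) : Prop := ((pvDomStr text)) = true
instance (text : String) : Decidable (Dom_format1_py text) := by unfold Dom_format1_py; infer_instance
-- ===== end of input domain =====

-- B groups the split items into 3-slices joined at the end instead of A's per-item loop with a modulo counter; same cost, different decomposition.

-- ===== PORT A =====
def format1_py (text : String) : String :=
  let texts := (PySem.Str.split? text ";").getD []
  (PySem.List.pyRange 0 (texts.length : Int) 1).foldl
    (fun ret i =>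
      if i == 0 then PySem.List.pyGetD texts i "" ++ ";"
      else
        let r := ret ++ PySem.List.pyGetD texts i "" ++ ";"
        if PySem.Int.mod (i + 1) 3 == 0 then r ++ "\n" else r) ""

-- ===== PORT B =====
def format1_py_alt (text : String) : String :=
  let texts := (PySem.Str.split? text ";").getD []
  let pieces := (PySem.List.pyRange 0 (texts.length : Int) 3).map (fun i =>
    let chunk := PySem.List.slice texts (some i) (some (i + 3))
    let piece := PySem.Str.join "" (chunk.map (fun t => t ++ ";"))
    if (chunk.length : Int) == 3 then piece ++ "\n" else piece)
  PySem.Str.join "" pieces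

-- ===== PRECONDITION & SPEC =====
def Spec_format1_py (text : String) (out : String) : Prop := out = format1_py_alt text
instance (text : String) (out : String) : Decidable (Spec_format1_py text out) := by unfold Spec_format1_py; infer_instance

-- ===== CLAIM (what is proved, stated in full; the proofs are below) =====
def Claim_equal_format1_py : Prop := ∀ (text : String), Dom_format1_py text → Spec_format1_py text (format1_py text)

-- ===== LEMMAS AND PROOFS =====

-- reference chunk-recursive formatter both ports are reduced to
def chunkFmt : List String → String
  | [] => ""
  | [a] => a ++ ";"
  | [a, b] => a ++ ";" ++ (b ++ ";")
  | a :: b :: c :: rest => a ++ ";" ++ (b ++ ";") ++ (c ++ ";") ++ "\n" ++ chunkFmt rest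

def stepU (texts : List String) (ret : String) (i : Int) : String :=
  let r := ret ++ PySem.List.pyGetD texts i "" ++ ";"
  if PySem.Int.mod (i + 1) 3 == 0 then r ++ "\n" else r

lemma lemmaA_uniform (texts : List String) :
    (PySem.List.pyRange 0 (texts.length : Int) 1).foldl
      (fun ret i =>
        if i == 0 then PySem.List.pyGetD texts i "" ++ ";"
        else
          let r := ret ++ PySem.List.pyGetD texts i "" ++ ";"
          if PySem.Int.mod (i + 1) 3 == 0 then r ++ "\n" else r) ""
    = (PySem.List.pyRange 0 (texts.length : Int) 1).foldl (stepU texts) "" := by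
  rcases texts with _ | ⟨t, rest⟩
  · simp [PySem.List.pyRange_one_eq_nil]
  · have hpos : (0:Int) < (((t :: rest) : List String).length : Int) := by
      simp
    rw [PySem.List.pyRange_one_cons hpos]
    simp only [List.foldl_cons]
    have hcong : ∀ (acc : String), ∀ x ∈ PySem.List.pyRange (0+1) (((t :: rest) : List String).length : Int) 1,
        (fun (ret : String) (i : Int) =>
          if i == 0 then PySem.List.pyGetD (t :: rest) i "" ++ ";"
          else
            let r := ret ++ PySem.List.pyGetD (t :: rest) i "" ++ ";"
            if PySem.Int.mod (i + 1) 3 == 0 then r ++ "\n" else r) acc x = stepU (t :: rest) acc x := by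
      intro acc x hx
      have h := (PySem.List.mem_pyRange_one.mp hx).1
      have hne : (x == 0) = false := by simp; omega
      simp only [stepU, hne, Bool.false_eq_true, if_false]
    rw [PySem.List.foldl_congr_mem _ _ _ _ hcong]
    congr 1

lemma getD_of_drop {full : List String} {j : Nat} {a : String} {ts : List String}
    (h : full.drop j = a :: ts) : PySem.List.pyGetD full (j : Int) "" = a := by
  rw [PySem.List.pyGetD_natCast]
  have h0 : (full.drop j)[0]? = some a := by rw [h]; rfl
  rw [List.getElem?_drop] at h0
  simp only [Nat.add_zero] at h0
  simp [List.getD, h0]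

lemma lemmaL (ts : List String) :
    ∀ (full : List String) (j : Nat), full.drop j = ts → j % 3 = 0 → ∀ (acc : String),
      (PySem.List.pyRange (j : Int) (full.length : Int) 1).foldl (stepU full) acc
      = acc ++ chunkFmt ts := by
  induction ts using chunkFmt.induct with
  | case1 =>
    intro full j hd hm acc
    have hlen : full.length ≤ j := by
      have := congrArg List.length hd; simp at this; omega
    rw [PySem.List.pyRange_one_eq_nil (by exact_mod_cast hlen)]
    simp [chunkFmt]
  | case2 a =>
    intro full j hd hm acc
    have hlen : full.length = j + 1 := by
      have := congrArg List.length hd; simp at this; omega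
    rw [PySem.List.pyRange_one_cons (by omega),
        PySem.List.pyRange_one_eq_nil (by omega)]
    simp only [List.foldl_cons, List.foldl_nil, stepU]
    rw [getD_of_drop hd]
    have hmod : (PySem.Int.mod ((j : Int) + 1) 3 == 0) = false := by
      simp [PySem.Int.mod, Int.fmod_eq_emod]; omega
    simp only [hmod, Bool.false_eq_true, if_false]
    apply String.toList_inj.mp
    simp [chunkFmt]
  | case3 a b =>
    intro full j hd hm acc
    have hlen : full.length = j + 2 := by
      have := congrArg List.length hd; simp at this; omega
    have hd2 : full.drop (j+1) = [b] := by
      have : full.drop (j+1) = (full.drop j).drop 1 := by rw [List.drop_drop]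
      rw [this, hd]; rfl
    rw [PySem.List.pyRange_one_cons (by omega),
        PySem.List.pyRange_one_cons (by omega),
        PySem.List.pyRange_one_eq_nil (by omega)]
    simp only [List.foldl_cons, List.foldl_nil, stepU]
    have h1 : PySem.List.pyGetD full ((j:Int)) "" = a := getD_of_drop hd
    have h2 : PySem.List.pyGetD full ((j:Int) + 1) "" = b := by
      have e : (j:Int) + 1 = ((j + 1 : Nat) : Int) := by push_cast; ring
      rw [e]; exact getD_of_drop hd2
    have hm1 : (PySem.Int.mod ((j : Int) + 1) 3 == 0) = false := by
      simp [PySem.Int.mod, Int.fmod_eq_emod]; omega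
    have hm2 : (PySem.Int.mod ((j : Int) + 1 + 1) 3 == 0) = false := by
      simp [PySem.Int.mod, Int.fmod_eq_emod]; omega
    rw [h1]
    simp only [hm1, hm2, Bool.false_eq_true, if_false, h2]
    apply String.toList_inj.mp
    simp [chunkFmt]
  | case4 a b c rest ih =>
    intro full j hd hm acc
    have hlen : j + 3 ≤ full.length := by
      have := congrArg List.length hd; simp at this; omega
    have hd1 : full.drop (j+1) = b :: c :: rest := by
      have : full.drop (j+1) = (full.drop j).drop 1 := by rw [List.drop_drop]
      rw [this, hd]; rfl
    have hd2 : full.drop (j+2) = c :: rest := by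
      have : full.drop (j+2) = (full.drop j).drop 2 := by rw [List.drop_drop]
      rw [this, hd]; rfl
    have hd3 : full.drop (j+3) = rest := by
      have : full.drop (j+3) = (full.drop j).drop 3 := by rw [List.drop_drop]
      rw [this, hd]; rfl
    rw [PySem.List.pyRange_one_cons (by omega),
        PySem.List.pyRange_one_cons (by omega),
        PySem.List.pyRange_one_cons (by omega)]
    simp only [List.foldl_cons]
    have h1 : PySem.List.pyGetD full ((j:Int)) "" = a := getD_of_drop hd
    have h2 : PySem.List.pyGetD full ((j:Int) + 1) "" = b := by
      have e : (j:Int) + 1 = ((j + 1 : Nat) : Int) := by push_cast; ring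
      rw [e]; exact getD_of_drop hd1
    have h3 : PySem.List.pyGetD full ((j:Int) + 1 + 1) "" = c := by
      have e : (j:Int) + 1 + 1 = ((j + 2 : Nat) : Int) := by push_cast; ring
      rw [e]; exact getD_of_drop hd2
    have hm1 : (PySem.Int.mod ((j : Int) + 1) 3 == 0) = false := by
      simp [PySem.Int.mod, Int.fmod_eq_emod]; omega
    have hm2 : (PySem.Int.mod ((j : Int) + 1 + 1) 3 == 0) = false := by
      simp [PySem.Int.mod, Int.fmod_eq_emod]; omega
    have hm3 : (PySem.Int.mod ((j : Int) + 1 + 1 + 1) 3 == 0) = true := by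
      simp [PySem.Int.mod, Int.fmod_eq_emod]; omega
    simp only [stepU, h1, h2, h3, hm1, hm2, hm3, Bool.false_eq_true, if_false, if_true]
    have hrange : (j:Int) + 1 + 1 + 1 = ((j + 3 : Nat) : Int) := by push_cast; ring
    rw [hrange, ih full (j+3) hd3 (by omega)]
    apply String.toList_inj.mp
    simp [chunkFmt]

lemma r3_cons (a b : Int) (h : a < b) :
    PySem.List.pyRange a b 3 = a :: PySem.List.pyRange (a + 3) b 3 := by
  rw [PySem.List.pyRange_of_pos _ _ (by norm_num), PySem.List.pyRange_of_pos _ _ (by norm_num)]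
  rw [if_pos h]
  by_cases h3 : a + 3 < b
  · rw [if_pos h3]
    have hc : ((b - a + 3 - 1) / 3).toNat = ((b - (a + 3) + 3 - 1) / 3).toNat + 1 := by omega
    rw [hc, List.range_succ_eq_map]
    simp only [List.map_cons, List.map_map]
    congr 1
    · simp
    · apply List.map_congr_left
      intro k _
      simp [Function.comp]
      ring
  · rw [if_neg h3]
    have hc : ((b - a + 3 - 1) / 3).toNat = 1 := by omega
    rw [hc]
    simp

lemma r3_shift (n : Int) :
    PySem.List.pyRange 3 n 3 = (PySem.List.pyRange 0 (n - 3) 3).map (· + 3) := by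
  rw [PySem.List.pyRange_of_pos _ _ (by norm_num), PySem.List.pyRange_of_pos _ _ (by norm_num)]
  by_cases h : 3 < n
  · rw [if_pos h, if_pos (by omega)]
    have hc : ((n - 3 + 3 - 1) / 3).toNat = ((n - 3 - 0 + 3 - 1) / 3).toNat := by omega
    rw [hc, List.map_map]
    apply List.map_congr_left
    intro k _
    simp [Function.comp]
    ring
  · rw [if_neg h, if_neg (by omega)]
    simp

lemma joinNil (L : List (List Char)) : PySem.Chars.join [] L = L.flatten := by
  induction L with
  | nil => simp [PySem.Chars.join_nil]
  | cons p rest ih =>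
    cases rest with
    | nil => simp [PySem.Chars.join_singleton]
    | cons q rest' =>
      rw [PySem.Chars.join_cons_cons]
      simp [ih]

lemma lemmaB (ts : List String) :
    PySem.Str.join "" ((PySem.List.pyRange 0 (ts.length : Int) 3).map (fun i =>
      let chunk := PySem.List.slice ts (some i) (some (i + 3))
      let piece := PySem.Str.join "" (chunk.map (fun t => t ++ ";"))
      if (chunk.length : Int) == 3 then piece ++ "\n" else piece))
    = chunkFmt ts := by
  induction ts using chunkFmt.induct with
  | case1 =>
    simp [PySem.List.pyRange_of_pos, chunkFmt]
    apply String.toList_inj.mp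
    simp [PySem.Str.toList_join, PySem.Chars.join_nil]
  | case2 a =>
    have h1 : PySem.List.pyRange 0 (1 : Int) 3 = [0] := by decide
    norm_num [h1, PySem.List.slice_to]
    apply String.toList_inj.mp
    simp [chunkFmt, PySem.Str.toList_join]
  | case3 a b =>
    have h1 : PySem.List.pyRange 0 (2 : Int) 3 = [0] := by decide
    norm_num [h1, PySem.List.slice_to]
    apply String.toList_inj.mp
    simp [chunkFmt, PySem.Str.toList_join, joinNil]
  | case4 a b c rest ih =>
    have hn : (((a :: b :: c :: rest : List String)).length : Int) = (rest.length : Int) + 3 := by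
      push_cast [List.length_cons]; ring
    rw [hn, r3_cons 0 ((rest.length : Int) + 3) (by positivity)]
    have h03 : (0:Int) + 3 = 3 := by norm_num
    rw [h03, r3_shift]
    have hsub : (rest.length : Int) + 3 - 3 = (rest.length : Int) := by ring
    rw [hsub, List.map_cons, List.map_map]
    have htail : ∀ i ∈ PySem.List.pyRange 0 (rest.length : Int) 3,
        ((fun i =>
          let chunk := PySem.List.slice (a :: b :: c :: rest) (some i) (some (i + 3))
          let piece := PySem.Str.join "" (chunk.map (fun t => t ++ ";"))
          if (chunk.length : Int) == 3 then piece ++ "\n" else piece) ∘ (· + 3)) i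
        = (fun i =>
          let chunk := PySem.List.slice rest (some i) (some (i + 3))
          let piece := PySem.Str.join "" (chunk.map (fun t => t ++ ";"))
          if (chunk.length : Int) == 3 then piece ++ "\n" else piece) i := by
      intro i hi
      have h0i : 0 ≤ i := by
        have := (PySem.List.mem_pyRange_iff_of_pos (s := 3) (by norm_num) i).mp hi
        omega
      have hchunk : PySem.List.slice (a :: b :: c :: rest) (some (i + 3)) (some (i + 3 + 3))
          = PySem.List.slice rest (some i) (some (i + 3)) := by
        rw [PySem.List.slice_toNat _ (by omega) (by omega), PySem.List.slice_toNat _ h0i (by omega)]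
        have e1 : (i + 3).toNat = i.toNat + 3 := by omega
        have e2 : (i + 3 + 3).toNat = i.toNat + 6 := by omega
        rw [e1, e2]
        have hd : (a :: b :: c :: rest).drop (i.toNat + 3) = rest.drop i.toNat := by
          simp [List.drop_succ_cons]
        rw [hd]
        congr 1
        omega
      simp only [Function.comp_apply, hchunk]
    rw [List.map_congr_left htail]
    apply String.toList_inj.mp
    have ihl := congrArg String.toList ih
    simp only [PySem.Str.toList_join, String.toList_empty, joinNil, List.map_map] at ihl ⊢
    have hsl : PySem.List.slice (a :: b :: c :: rest) (some (0:Int)) (some ((0:Int) + 3))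
        = [a, b, c] := by
      norm_num [PySem.List.slice_to]
      rfl
    simp only [hsl]
    simp only [List.map_cons, List.map_map, List.flatten_cons]
    rw [ihl]
    simp [PySem.Str.toList_join, String.toList_empty, joinNil, chunkFmt, List.append_assoc]

-- ===== VERDICT (by name: the statement is the Claim_ definition above) =====
theorem format1_py_spec : Claim_equal_format1_py := by
  intro text _
  unfold Spec_format1_py format1_py format1_py_alt
  rw [lemmaA_uniform]
  have hL := lemmaL ((PySem.Str.split? text ";").getD [])
      ((PySem.Str.split? text ";").getD []) 0 (by simp) (by simp) ""
  norm_num at hL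
  rw [hL]
  exact (lemmaB _).symm
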